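-- pv_equiv track=rewrite | github.com/evan-07/gcp-role-lookup | app/page_views/permissions.py | find_exact_matches
-- ===== SOURCE A (Python) =====
-- def sort_key(role_id: str) -> tuple:
--     """Sort bucket: predefined (roles/) → project → org → other, then alpha."""
--     if role_id.startswith("roles/"):
--         return (0, role_id)
--     if role_id.startswith("projects/"):
--         return (1, role_id)
--     if role_id.startswith("organizations/"):
--         return (2, role_id)
--     return (3, role_id)
--
-- def find_exact_matches(
--     query: str, permissions: dict[str, set[str]]
-- ) -> list[str]:
--     """Return sorted role IDs whose permission set contains query exactly (case-insensitive)."""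
--     q = query.lower()
--     return sorted(
--         [rid for rid, perms in permissions.items() if q in {p.lower() for p in perms}],
--         key=sort_key,
--     )
-- ===== SOURCE B (Python) =====
-- def find_exact_matches(
--     query: str, permissions: dict[str, set[str]]
-- ) -> list[str]:
--     """Return sorted role IDs whose permission set contains query exactly (case-insensitive)."""
--     q = query.lower()
--     pre, proj, org, other = [], [], [], []
--     for rid, perms in permissions.items():
--         if any(p.lower() == q for p in perms):
--             if rid.startswith("roles/"):
--                 pre.append(rid)
--             elif rid.startswith("projects/"):
--                 proj.append(rid)
--             elif rid.startswith("organizations/"):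
--                 org.append(rid)
--             else:
--                 other.append(rid)
--     return sorted(pre) + sorted(proj) + sorted(org) + sorted(other)
-- ===== Notes on version B (the rewrite author's own statement) =====
-- stated objective: alternative
-- what changed: Replaces the composite-tuple sort key (sorted with key=sort_key) by a single pass that classifies matching role IDs into four bucket lists (roles/, projects/, organizations/, other), sorts each bucket by plain string order and concatenates them; the membership test builds no intermediate lowered set (any() with short-circuit instead).
import Mathlib
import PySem

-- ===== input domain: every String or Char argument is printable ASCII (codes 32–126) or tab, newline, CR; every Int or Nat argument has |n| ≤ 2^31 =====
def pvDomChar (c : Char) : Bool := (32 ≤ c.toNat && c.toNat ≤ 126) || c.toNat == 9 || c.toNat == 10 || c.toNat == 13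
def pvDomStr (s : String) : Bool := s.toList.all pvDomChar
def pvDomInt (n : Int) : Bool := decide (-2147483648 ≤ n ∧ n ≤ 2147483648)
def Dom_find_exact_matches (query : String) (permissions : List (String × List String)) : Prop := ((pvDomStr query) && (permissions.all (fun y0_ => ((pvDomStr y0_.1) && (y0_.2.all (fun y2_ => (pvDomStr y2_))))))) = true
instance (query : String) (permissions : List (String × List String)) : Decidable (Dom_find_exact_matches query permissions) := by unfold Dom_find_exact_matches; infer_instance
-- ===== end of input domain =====

-- B replaces A's single sort with a composite tuple key by a one-pass four-way bucket
-- classification followed by four plain string sorts concatenated in bucket order (alternative decomposition; same result).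

-- ===== PORT A =====
def sort_key (role_id : String) : Int × String :=
  if PySem.Str.startswith role_id "roles/" then (0, role_id)
  else if PySem.Str.startswith role_id "projects/" then (1, role_id)
  else if PySem.Str.startswith role_id "organizations/" then (2, role_id)
  else (3, role_id)

def find_exact_matches (query : String) (permissions : List (String × List String)) : List String :=
  let q := PySem.Str.lower query
  PySem.List.sorted2
    ((permissions.filter
        (fun rp => PySem.Set.contains (PySem.Set.ofList (rp.2.map PySem.Str.lower)) q)).map
      (fun rp => rp.1))
    (fun r => (sort_key r).1) (fun r => (sort_key r).2)

-- ===== PORT B =====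
def find_exact_matches_alt (query : String) (permissions : List (String × List String)) : List String :=
  let q := PySem.Str.lower query
  let b := permissions.foldl
    (fun (b : List String × List String × List String × List String) rp =>
      if rp.2.any (fun p => PySem.Str.lower p == q) then
        if PySem.Str.startswith rp.1 "roles/" then (b.1 ++ [rp.1], b.2.1, b.2.2.1, b.2.2.2)
        else if PySem.Str.startswith rp.1 "projects/" then (b.1, b.2.1 ++ [rp.1], b.2.2.1, b.2.2.2)
        else if PySem.Str.startswith rp.1 "organizations/" then (b.1, b.2.1, b.2.2.1 ++ [rp.1], b.2.2.2)
        else (b.1, b.2.1, b.2.2.1, b.2.2.2 ++ [rp.1])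
      else b)
    ([], [], [], [])
  PySem.List.sorted b.1 (fun r => r) ++ PySem.List.sorted b.2.1 (fun r => r) ++
    PySem.List.sorted b.2.2.1 (fun r => r) ++ PySem.List.sorted b.2.2.2 (fun r => r)

-- ===== PRECONDITION & SPEC =====
def Spec_find_exact_matches (query : String) (permissions : List (String × List String)) (out : List String) : Prop := out = find_exact_matches_alt query permissions
instance (query : String) (permissions : List (String × List String)) (out : List String) : Decidable (Spec_find_exact_matches query permissions out) := by unfold Spec_find_exact_matches; infer_instance

-- ===== CLAIM (what is proved, stated in full; the proofs are below) =====
def Claim_equal_find_exact_matches : Prop := ∀ (query : String) (permissions : List (String × List String)), Dom_find_exact_matches query permissions → Spec_find_exact_matches query permissions (find_exact_matches query permissions)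

-- ===== LEMMAS AND PROOFS =====

-- bucket number of a role id (0..3) and an encoding of A's tuple sort key as a single string key
def pvBucket (r : String) : Nat :=
  if PySem.Str.startswith r "roles/" then 0
  else if PySem.Str.startswith r "projects/" then 1
  else if PySem.Str.startswith r "organizations/" then 2 else 3

def pvEnc (r : String) : String := String.ofList (Char.ofNat (97 + pvBucket r) :: r.toList)

-- the four (mutually exclusive, exhaustive) bucket predicates of B's if/elif chain
def pvC0 (r : String) : Bool := PySem.Str.startswith r "roles/"
def pvC1 (r : String) : Bool := !pvC0 r && PySem.Str.startswith r "projects/"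
def pvC2 (r : String) : Bool :=
  !pvC0 r && !PySem.Str.startswith r "projects/" && PySem.Str.startswith r "organizations/"
def pvC3 (r : String) : Bool :=
  !pvC0 r && !PySem.Str.startswith r "projects/" && !PySem.Str.startswith r "organizations/"

theorem pvBucket_le (r : String) : pvBucket r ≤ 3 := by
  unfold pvBucket; split_ifs <;> omega

theorem pvEnc_injective : Function.Injective pvEnc := by
  intro a b h
  unfold pvEnc at h
  have h2 := congrArg String.toList h
  simp only [String.toList_ofList] at h2
  exact String.toList_injective (List.tail_eq_of_cons_eq h2)

theorem pvBucket_C0 (r : String) (h : pvC0 r = true) : pvBucket r = 0 := by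
  simp only [pvC0] at h; unfold pvBucket; rw [h]; simp
theorem pvBucket_C1 (r : String) (h : pvC1 r = true) : pvBucket r = 1 := by
  simp only [pvC1, Bool.and_eq_true, Bool.not_eq_eq_eq_not, Bool.not_true, pvC0] at h
  unfold pvBucket; rw [h.1, h.2]; simp
theorem pvBucket_C2 (r : String) (h : pvC2 r = true) : pvBucket r = 2 := by
  simp only [pvC2, Bool.and_eq_true, Bool.not_eq_eq_eq_not, Bool.not_true, pvC0] at h
  unfold pvBucket; rw [h.1.1, h.1.2, h.2]; simp
theorem pvBucket_C3 (r : String) (h : pvC3 r = true) : pvBucket r = 3 := by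
  simp only [pvC3, Bool.and_eq_true, Bool.not_eq_eq_eq_not, Bool.not_true, pvC0] at h
  unfold pvBucket; rw [h.1.1, h.1.2, h.2]; simp

theorem pvEnc_lt_of_bucket_lt (a b : String) (h : pvBucket a < pvBucket b) : pvEnc a < pvEnc b := by
  have ha := pvBucket_le a
  have hb := pvBucket_le b
  unfold pvEnc
  rw [String.lt_iff_toList_lt]
  simp only [String.toList_ofList]
  apply List.cons_lt_cons_iff.mpr
  left
  set i := pvBucket a
  set j := pvBucket b
  interval_cases i <;> interval_cases j <;> decide

theorem pvEnc_le_of_bucket_eq (a b : String) (hb : pvBucket a = pvBucket b) (hle : a ≤ b) :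
    pvEnc a ≤ pvEnc b := by
  rcases lt_or_eq_of_le hle with hlt | heq
  · apply le_of_lt
    unfold pvEnc
    rw [String.lt_iff_toList_lt]
    simp only [String.toList_ofList]
    apply List.cons_lt_cons_iff.mpr
    right
    exact ⟨by rw [hb], String.lt_iff_toList_lt.mp hlt⟩
  · rw [heq]

-- A's and B's membership tests agree
theorem pvMemTest (ps : List String) (q : String) :
    PySem.Set.contains (PySem.Set.ofList (ps.map PySem.Str.lower)) q
      = ps.any (fun p => PySem.Str.lower p == q) := by
  apply Bool.eq_iff_iff.mpr
  simp [PySem.Set.mem_ofList, List.mem_map, List.any_eq_true]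

-- the before-relation of A's sorted2 equals that of sorted with the single key pvEnc
theorem pvBefore_eq (a b : String) :
    (decide ((sort_key a).1 < (sort_key b).1) ||
      (!decide ((sort_key b).1 < (sort_key a).1) && decide ((sort_key a).2 < (sort_key b).2)))
    = decide (pvEnc a < pvEnc b) := by
  apply Bool.eq_iff_iff.mpr
  simp only [Bool.or_eq_true, Bool.and_eq_true, Bool.not_eq_eq_eq_not, Bool.not_true,
    decide_eq_true_eq, decide_eq_false_iff_not, pvEnc, String.lt_iff_toList_lt,
    String.toList_ofList, List.cons_lt_cons_iff, pvBucket, sort_key]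
  split_ifs <;> simp

-- hence A's sorted2 IS sorted with the single key pvEnc
theorem pvSorted2_eq (m : List String) :
    PySem.List.sorted2 m (fun r => (sort_key r).1) (fun r => (sort_key r).2)
      = PySem.List.sorted m pvEnc := by
  have hb : (fun (a b : String) => decide ((sort_key a).1 < (sort_key b).1) ||
      (!decide ((sort_key b).1 < (sort_key a).1) && decide ((sort_key a).2 < (sort_key b).2)))
      = (fun a b => decide (pvEnc a < pvEnc b)) :=
    funext fun a => funext fun b => pvBefore_eq a b
  calc PySem.List.sorted2 m (fun r => (sort_key r).1) (fun r => (sort_key r).2)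
      = List.foldl (fun acc x => PySem.List.insertBy
          (fun a b => decide ((sort_key a).1 < (sort_key b).1) ||
            (!decide ((sort_key b).1 < (sort_key a).1) && decide ((sort_key a).2 < (sort_key b).2)))
          x acc) [] m := rfl
    _ = List.foldl (fun acc x => PySem.List.insertBy (fun a b => decide (pvEnc a < pvEnc b)) x acc) [] m := by
          rw [hb]
    _ = PySem.List.sorted m pvEnc := (PySem.List.sorted_eq_foldl_insertBy m pvEnc).symm

-- B's fold fills the four buckets with the bucket-filtered matches
theorem pvFoldl (q : String) (perms : List (String × List String))
    (init : List String × List String × List String × List String) :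
    perms.foldl
      (fun (b : List String × List String × List String × List String) rp =>
        if rp.2.any (fun p => PySem.Str.lower p == q) then
          if PySem.Str.startswith rp.1 "roles/" then (b.1 ++ [rp.1], b.2.1, b.2.2.1, b.2.2.2)
          else if PySem.Str.startswith rp.1 "projects/" then (b.1, b.2.1 ++ [rp.1], b.2.2.1, b.2.2.2)
          else if PySem.Str.startswith rp.1 "organizations/" then (b.1, b.2.1, b.2.2.1 ++ [rp.1], b.2.2.2)
          else (b.1, b.2.1, b.2.2.1, b.2.2.2 ++ [rp.1])
        else b)
      init
    = (init.1 ++ ((perms.filter (fun rp => rp.2.any (fun p => PySem.Str.lower p == q))).map (fun rp => rp.1)).filter pvC0,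
       init.2.1 ++ ((perms.filter (fun rp => rp.2.any (fun p => PySem.Str.lower p == q))).map (fun rp => rp.1)).filter pvC1,
       init.2.2.1 ++ ((perms.filter (fun rp => rp.2.any (fun p => PySem.Str.lower p == q))).map (fun rp => rp.1)).filter pvC2,
       init.2.2.2 ++ ((perms.filter (fun rp => rp.2.any (fun p => PySem.Str.lower p == q))).map (fun rp => rp.1)).filter pvC3) := by
  induction perms generalizing init with
  | nil => simp
  | cons rp t ih =>
    rcases hm : rp.2.any (fun p => PySem.Str.lower p == q) with _ | _
    · simp only [List.foldl_cons, hm, Bool.false_eq_true, if_false, List.filter_cons, ih]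
    · rcases h0 : PySem.Str.startswith rp.1 "roles/" with _ | _ <;>
      rcases h1 : PySem.Str.startswith rp.1 "projects/" with _ | _ <;>
      rcases h2 : PySem.Str.startswith rp.1 "organizations/" with _ | _ <;>
      · simp only [List.foldl_cons, List.filter_cons, List.map_cons, hm, h0, h1, h2, pvC0, pvC1,
          pvC2, pvC3, Bool.not_true, Bool.not_false, Bool.true_and, Bool.false_and, Bool.and_true,
          Bool.and_false, Bool.and_self, eq_self_iff_true, if_true, Bool.false_eq_true, if_false,
          ih, List.append_assoc, List.singleton_append]

theorem pvPermMid {α : Type} (l₁ l₂ t : List α) (x : α) (h : (l₁ ++ l₂).Perm t) :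
    (l₁ ++ (x :: l₂)).Perm (x :: t) :=
  List.perm_middle.trans (h.cons x)

-- the four bucket filters together are a permutation of the filtered list
theorem pvPermBuckets (m : List String) :
    ((m.filter pvC0 ++ m.filter pvC1) ++ m.filter pvC2 ++ m.filter pvC3).Perm m := by
  induction m with
  | nil => simp
  | cons x t ih =>
    have ihn : (t.filter pvC0 ++ (t.filter pvC1 ++ (t.filter pvC2 ++ t.filter pvC3))).Perm t := by
      simpa [List.append_assoc] using ih
    rcases h0 : PySem.Str.startswith x "roles/" with _ | _ <;>
    rcases h1 : PySem.Str.startswith x "projects/" with _ | _ <;>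
    rcases h2 : PySem.Str.startswith x "organizations/" with _ | _ <;>
      simp only [List.filter_cons, pvC0, pvC1, pvC2, pvC3, h0, h1, h2, Bool.not_true,
        Bool.not_false, Bool.and_self, Bool.true_and, Bool.false_and, Bool.and_true,
        Bool.and_false, eq_self_iff_true, if_true, Bool.false_eq_true, if_false,
        List.append_assoc, List.cons_append] <;>
      first
      | exact ihn.cons x
      | exact pvPermMid _ _ t x ihn
      | (rw [← List.append_assoc]
         exact pvPermMid _ _ t x (by rw [List.append_assoc]; exact ihn))
      | (rw [← List.append_assoc, ← List.append_assoc]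
         exact pvPermMid _ _ t x (by rw [List.append_assoc, List.append_assoc]; exact ihn))

-- members of a sorted bucket all carry that bucket number
theorem pvMemBucket (m : List String) (c : String → Bool) (i : Nat)
    (hc : ∀ r, c r = true → pvBucket r = i) (r : String)
    (hr : r ∈ PySem.List.sorted (m.filter c) (fun s => s)) : pvBucket r = i := by
  rw [PySem.List.mem_sorted] at hr
  exact hc r (List.mem_filter.mp hr).2

-- a sorted bucket is pairwise pvEnc-nondecreasing
theorem pvPairwiseBucket (m : List String) (c : String → Bool) (i : Nat)
    (hc : ∀ r, c r = true → pvBucket r = i) :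
    List.Pairwise (fun a b => pvEnc a ≤ pvEnc b)
      (PySem.List.sorted (m.filter c) (fun s => s)) := by
  refine (PySem.List.sorted_pairwise (m.filter c) (fun s => s)).imp_of_mem ?_
  intro a b ha hb hle
  exact pvEnc_le_of_bucket_eq a b
    ((pvMemBucket m c i hc a ha).trans (pvMemBucket m c i hc b hb).symm) hle

theorem pvCross (m : List String) (c c' : String → Bool) (i j : Nat) (hij : i < j)
    (hc : ∀ r, c r = true → pvBucket r = i) (hc' : ∀ r, c' r = true → pvBucket r = j) :
    ∀ a ∈ PySem.List.sorted (m.filter c) (fun s => s),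
      ∀ b ∈ PySem.List.sorted (m.filter c') (fun s => s), pvEnc a ≤ pvEnc b := by
  intro a ha b hb
  apply le_of_lt
  apply pvEnc_lt_of_bucket_lt
  rw [pvMemBucket m c i hc a ha, pvMemBucket m c' j hc' b hb]
  exact hij

-- the heart of the equivalence: sorting with the composite key equals
-- sorting each bucket alphabetically and concatenating buckets
theorem pvMain (m : List String) :
    PySem.List.sorted m pvEnc
      = PySem.List.sorted (m.filter pvC0) (fun s => s) ++ PySem.List.sorted (m.filter pvC1) (fun s => s) ++
        PySem.List.sorted (m.filter pvC2) (fun s => s) ++ PySem.List.sorted (m.filter pvC3) (fun s => s) := by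
  apply PySem.List.eq_of_perm_of_pairwise_le_of_injective pvEnc pvEnc_injective
  · -- permutation
    refine (PySem.List.sorted_perm m pvEnc false).trans ?_
    refine (pvPermBuckets m).symm.trans ?_
    exact ((((PySem.List.sorted_perm (m.filter pvC0) (fun s => s) false).symm.append
      (PySem.List.sorted_perm (m.filter pvC1) (fun s => s) false).symm).append
      (PySem.List.sorted_perm (m.filter pvC2) (fun s => s) false).symm).append
      (PySem.List.sorted_perm (m.filter pvC3) (fun s => s) false).symm).symm.symm
  · exact PySem.List.sorted_pairwise m pvEnc
  · -- pairwise on the concatenation of the four sorted buckets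
    rw [List.append_assoc, List.append_assoc]
    rw [List.pairwise_append]
    refine ⟨pvPairwiseBucket m pvC0 0 pvBucket_C0, ?_, ?_⟩
    · rw [List.pairwise_append]
      refine ⟨pvPairwiseBucket m pvC1 1 pvBucket_C1, ?_, ?_⟩
      · rw [List.pairwise_append]
        exact ⟨pvPairwiseBucket m pvC2 2 pvBucket_C2, pvPairwiseBucket m pvC3 3 pvBucket_C3,
          pvCross m pvC2 pvC3 2 3 (by omega) pvBucket_C2 pvBucket_C3⟩
      · intro a ha b hb
        rw [List.mem_append] at hb
        rcases hb with hb | hb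
        · exact pvCross m pvC1 pvC2 1 2 (by omega) pvBucket_C1 pvBucket_C2 a ha b hb
        · exact pvCross m pvC1 pvC3 1 3 (by omega) pvBucket_C1 pvBucket_C3 a ha b hb
    · intro a ha b hb
      rw [List.mem_append] at hb
      rcases hb with hb | hb
      · exact pvCross m pvC0 pvC1 0 1 (by omega) pvBucket_C0 pvBucket_C1 a ha b hb
      · rw [List.mem_append] at hb
        rcases hb with hb | hb
        · exact pvCross m pvC0 pvC2 0 2 (by omega) pvBucket_C0 pvBucket_C2 a ha b hb
        · exact pvCross m pvC0 pvC3 0 3 (by omega) pvBucket_C0 pvBucket_C3 a ha b hb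

-- ===== VERDICT (by name: the statement is the Claim_ definition above) =====
theorem find_exact_matches_spec : Claim_equal_find_exact_matches := by
  intro query permissions _
  unfold Spec_find_exact_matches find_exact_matches find_exact_matches_alt
  have hpred : (fun (rp : String × List String) =>
      PySem.Set.contains (PySem.Set.ofList (rp.2.map PySem.Str.lower)) (PySem.Str.lower query))
      = (fun rp => rp.2.any (fun p => PySem.Str.lower p == PySem.Str.lower query)) :=
    funext fun rp => pvMemTest rp.2 (PySem.Str.lower query)
  simp only []
  rw [hpred, pvSorted2_eq, pvFoldl]
  simp only [List.nil_append]
  exact pvMain _
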